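-- pv_equiv track=rewrite | github.com/Daba-byte/SWEA | IM대비/1979_어디에단어가들어갈수있을까.py | where_word
-- ===== SOURCE A (Python) =====
-- def where_word(N, K, arr):
--     word_count = 0
--     # 가로 방향 검사
--     for i in range(N):
--         consecutive = 0
--         for j in range(N):
--             if arr[i][j] ==1:
--                 consecutive += 1
--             else:
--                 if consecutive == K:
--                     word_count += 1
--                 consecutive = 0
--         if consecutive == K:
--             word_count += 1
--
--     # 세로 방향 검사
--     for j in range(N):
--         consecutive = 0
--         for i in range(N):
--             if arr[i][j] == 1:
--                 consecutive += 1
--             else: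
--                 if consecutive == K:
--                     word_count += 1
--                 consecutive = 0
--         if consecutive == K:
--             word_count += 1
--
--     return word_count
-- ===== SOURCE B (Python) =====
-- def where_word(N, K, arr):
--     # Window test per candidate start cell instead of a running run-length counter.
--     def fits(line, j):
--         n = len(line)
--         return ((j == 0 or line[j - 1] != 1)
--                 and all(line[j + t] == 1 for t in range(K))
--                 and (j + K == n or line[j + K] != 1))
--
--     def count_line(line):
--         return sum(1 for j in range(len(line) - K + 1) if fits(line, j))
--
--     rows = [arr[i][:N] for i in range(N)]
--     cols = [[arr[i][j] for i in range(N)] for j in range(N)]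
--     return sum(count_line(l) for l in rows) + sum(count_line(l) for l in cols)
-- ===== Notes on version B (the rewrite author's own statement) =====
-- stated objective: alternative
-- what changed: Replaces A's running `consecutive` counter per row/column by a boundary-anchored window test: for each candidate start cell j it checks left boundary (edge or non-1), K ones, and right boundary (edge or non-1), summing over materialized row/column lists.
-- outside the precondition, e.g. on where_word(2, -1, [[1, 0], [0, 1]]): A returns 0, B raises IndexError
import Mathlib
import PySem

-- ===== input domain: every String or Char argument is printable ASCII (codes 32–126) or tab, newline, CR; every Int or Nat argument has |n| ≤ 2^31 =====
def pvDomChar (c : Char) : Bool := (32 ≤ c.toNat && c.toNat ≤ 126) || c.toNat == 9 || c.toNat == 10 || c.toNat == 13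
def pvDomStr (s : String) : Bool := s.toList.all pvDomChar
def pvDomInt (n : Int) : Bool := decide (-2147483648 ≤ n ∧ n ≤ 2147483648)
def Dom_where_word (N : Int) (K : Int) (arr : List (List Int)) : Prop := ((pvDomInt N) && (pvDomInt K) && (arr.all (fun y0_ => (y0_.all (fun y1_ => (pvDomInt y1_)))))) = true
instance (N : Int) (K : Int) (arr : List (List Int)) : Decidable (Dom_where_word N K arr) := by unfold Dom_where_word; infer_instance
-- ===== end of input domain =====

-- B replaces A's running run-length counter by a boundary-anchored window test per candidate
-- start cell (objective: alternative decomposition, not faster).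


-- ===== PORT A =====
-- the body of A's inner loops (if arr[i][j] == 1: consecutive += 1 else: …), on state (consecutive, word_count)
def pvStep (K : Int) (p : Int × Int) (x : Int) : Int × Int :=
  if x == 1 then (p.1 + 1, p.2) else (0, if p.1 == K then p.2 + 1 else p.2)

-- cell reads arr[i][j] via pyGetD: exact wherever the index is in range (guaranteed by Pre_).
def where_word (N : Int) (K : Int) (arr : List (List Int)) : Int :=
  let horiz := (PySem.List.pyRange 0 N 1).foldl (fun wc i =>
      let p := (PySem.List.pyRange 0 N 1).foldl
        (fun p j => pvStep K p (PySem.List.pyGetD (PySem.List.pyGetD arr i []) j 0)) (0, wc)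
      if p.1 == K then p.2 + 1 else p.2) 0
  (PySem.List.pyRange 0 N 1).foldl (fun wc j =>
      let p := (PySem.List.pyRange 0 N 1).foldl
        (fun p i => pvStep K p (PySem.List.pyGetD (PySem.List.pyGetD arr i []) j 0)) (0, wc)
      if p.1 == K then p.2 + 1 else p.2) horiz

-- ===== PORT B =====
-- fits(line, j): window of K ones starting at j, bounded by an edge or a non-1 on both sides
def pvFits (K : Int) (line : List Int) (j : Int) : Bool :=
  (j == 0 || !(PySem.List.pyGetD line (j - 1) 0 == 1))
  && ((PySem.List.pyRange 0 K 1).all (fun t => PySem.List.pyGetD line (j + t) 0 == 1))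
  && (j + K == (line.length : Int) || !(PySem.List.pyGetD line (j + K) 0 == 1))

-- count_line(line): sum(1 for j in range(len(line)-K+1) if fits(line, j))
def pvCountLine (K : Int) (line : List Int) : Int :=
  (PySem.List.pyRange 0 ((line.length : Int) - K + 1) 1).foldl
    (fun s j => if pvFits K line j then s + 1 else s) 0

def where_word_alt (N : Int) (K : Int) (arr : List (List Int)) : Int :=
  let rows := (PySem.List.pyRange 0 N 1).map
      (fun i => PySem.List.slice (PySem.List.pyGetD arr i []) none (some N))
  let cols := (PySem.List.pyRange 0 N 1).map
      (fun j => (PySem.List.pyRange 0 N 1).map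
        (fun i => PySem.List.pyGetD (PySem.List.pyGetD arr i []) j 0))
  (rows.foldl (fun s l => s + pvCountLine K l) 0)
  + (cols.foldl (fun s l => s + pvCountLine K l) 0)

-- ===== PRECONDITION & SPEC =====
-- Pre_ excludes (a) malformed grids, on which A raises IndexError, and (b) negative K on a
-- nonempty board (N > 0), outside the natural domain (a word length): there B's window
-- arithmetic indexes out of range and raises IndexError while A happens to return 0.
def Pre_where_word (N : Int) (K : Int) (arr : List (List Int)) : Prop :=
  (0 ≤ K ∨ N ≤ 0) ∧ N ≤ (arr.length : Int) ∧ ∀ row ∈ arr.take N.toNat, N ≤ (row.length : Int)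
instance (N : Int) (K : Int) (arr : List (List Int)) : Decidable (Pre_where_word N K arr) := by
  unfold Pre_where_word; infer_instance

def pvWitness_where_word : Int × Int × List (List Int) := (2, 1, [[1, 0], [0, 1]])

def Spec_where_word (N : Int) (K : Int) (arr : List (List Int)) (out : Int) : Prop := out = where_word_alt N K arr
instance (N : Int) (K : Int) (arr : List (List Int)) (out : Int) : Decidable (Spec_where_word N K arr out) := by unfold Spec_where_word; infer_instance

-- ===== CLAIM (what is proved, stated in full; the proofs are below) =====
def Claim_equal_where_word : Prop := ∀ (N : Int) (K : Int) (arr : List (List Int)), Dom_where_word N K arr → Pre_where_word N K arr → Spec_where_word N K arr (where_word N K arr)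

-- ===== LEMMAS AND PROOFS =====

-- recursive form of A's per-line scan, with running run length c
def pvSA (K : Int) : Int → List Int → Int
  | c, [] => if c == K then 1 else 0
  | c, x :: t => if x == 1 then pvSA K (c + 1) t else (if c == K then 1 else 0) + pvSA K 0 t

-- length of the leading run of 1s
def pvLead : List Int → Int
  | [] => 0
  | x :: t => if x == 1 then 1 + pvLead t else 0

-- fits with an explicit left-boundary flag at j = 0
def pvFitsB (K : Int) (b : Bool) (line : List Int) (j : Int) : Bool :=
  (if j == 0 then b else !(PySem.List.pyGetD line (j - 1) 0 == 1))
  && ((PySem.List.pyRange 0 K 1).all (fun t => PySem.List.pyGetD line (j + t) 0 == 1))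
  && (j + K == (line.length : Int) || !(PySem.List.pyGetD line (j + K) 0 == 1))

-- index-loop count of fitting windows, with left flag
def pvCountB (K : Int) (b : Bool) (line : List Int) : Int :=
  (PySem.List.pyRange 0 ((line.length : Int) - K + 1) 1).foldl
    (fun s j => if pvFitsB K b line j then s + 1 else s) 0

-- recursive form of the window count
def pvCB (K : Int) : Bool → List Int → Int
  | b, [] => if b && (K == 0) then 1 else 0
  | b, x :: t => (if pvFitsB K b (x :: t) 0 then 1 else 0) + pvCB K (x != 1) t

theorem pvLead_nonneg (L : List Int) : 0 ≤ pvLead L := by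
  induction L with
  | nil => simp [pvLead]
  | cons x t ih => by_cases h : x = 1 <;> simp [pvLead, h] <;> omega

theorem pvLead_one (t : List Int) : pvLead (1 :: t) = 1 + pvLead t := by simp [pvLead]

-- L0: A's fold from any state
theorem pvA_fold (K : Int) (L : List Int) : ∀ c acc : Int,
    (let p := L.foldl (pvStep K) (c, acc); if p.1 == K then p.2 + 1 else p.2)
      = acc + pvSA K c L := by
  induction L with
  | nil => intro c acc; simp only [List.foldl_nil, pvSA]; split_ifs <;> omega
  | cons x t ih =>
    intro c acc
    by_cases hx : x = 1
    · simpa [pvStep, hx, pvSA] using ih (c + 1) acc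
    · have := ih 0 (if c == K then acc + 1 else acc)
      simp only [List.foldl_cons, pvStep, pvSA, beq_iff_eq, hx, if_false] at *
      rw [this]; split_ifs <;> omega

theorem pyGetD_cons_shift (x : Int) (t : List Int) (i : Int) (hi : 0 ≤ i) :
    PySem.List.pyGetD (x :: t) (i + 1) 0 = PySem.List.pyGetD t i 0 := by
  obtain ⟨m, rfl⟩ : ∃ m : Nat, i = (m : Int) := ⟨i.toNat, (Int.toNat_of_nonneg hi).symm⟩
  have : ((m : Int) + 1) = ((m + 1 : Nat) : Int) := by push_cast; ring
  rw [this, PySem.List.pyGetD_natCast, PySem.List.pyGetD_natCast]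
  simp

-- counting fold with shifted accumulator
theorem pvCount_shift {α : Type} (l : List α) (p : α → Bool) : ∀ a : Int,
    l.foldl (fun s x => if p x then s + 1 else s) a
      = a + l.foldl (fun s x => if p x then s + 1 else s) 0 := by
  induction l with
  | nil => intro a; simp
  | cons x t ih =>
    intro a
    simp only [List.foldl_cons]
    rw [ih (if p x then a + 1 else a), ih (if p x then (0:Int) + 1 else 0)]
    split_ifs <;> omega

theorem pvFitsB_short (K : Int) (hK : 0 < K) (b : Bool) (M : List Int)
    (h : (M.length : Int) < K) : pvFitsB K b M 0 = false := by
  unfold pvFitsB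
  have hmem : (M.length : Int) ∈ PySem.List.pyRange 0 K 1 := by
    rw [PySem.List.mem_pyRange_one]; omega
  have hall : (PySem.List.pyRange 0 K 1).all
      (fun t => PySem.List.pyGetD M (0 + t) 0 == 1) = false := by
    rw [List.all_eq_false]
    refine ⟨(M.length : Int), hmem, ?_⟩
    rw [zero_add, PySem.List.pyGetD_natCast, List.getD_eq_default]
    · simp
    · omega
  rw [hall]
  simp

theorem pvCB_short (K : Int) (hK : 0 ≤ K) : ∀ (L : List Int) (b : Bool),
    (L.length : Int) < K → pvCB K b L = 0 := by
  intro L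
  induction L with
  | nil =>
    intro b h
    have hne : ¬ (K == 0) = true := by
      simp only [beq_iff_eq]
      simp only [List.length_nil, Nat.cast_zero] at h
      omega
    simp [pvCB, hne]
  | cons x t ih =>
    intro b h
    simp only [pvCB]
    have h1 : (t.length : Int) < K := by simp at h ⊢; omega
    rw [pvFitsB_short K (by simp at h; omega) b (x :: t) h, ih _ h1]
    simp

-- shift lemma: a window of x :: t at j + 1 is a window of t at j
theorem all_congr' {α : Type} (l : List α) (p q : α → Bool) (h : ∀ x ∈ l, p x = q x) :
    l.all p = l.all q := by
  induction l with
  | nil => rfl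
  | cons y t ih =>
    simp only [List.all_cons, h y List.mem_cons_self,
      ih (fun x hx => h x (List.mem_cons_of_mem y hx))]

theorem foldl_count_congr {α : Type} (l : List α) (p q : α → Bool)
    (h : ∀ x ∈ l, p x = q x) (a : Int) :
    l.foldl (fun s x => if p x then s + 1 else s) a
      = l.foldl (fun s x => if q x then s + 1 else s) a := by
  induction l generalizing a with
  | nil => rfl
  | cons y t ih =>
    simp only [List.foldl_cons, h y List.mem_cons_self]
    exact ih (fun x hx => h x (List.mem_cons_of_mem y hx)) _

theorem pvFitsB_shift (K : Int) (hK : 0 ≤ K) (b : Bool) (x : Int) (t : List Int) (k : Nat) :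
    pvFitsB K b (x :: t) ((k : Int) + 1) = pvFitsB K (x != 1) t (k : Int) := by
  have hleft : (if ((k : Int) + 1 == 0) = true then b
        else !(PySem.List.pyGetD (x :: t) ((k : Int) + 1 - 1) 0 == 1))
      = (if ((k : Int) == 0) = true then (x != 1)
        else !(PySem.List.pyGetD t ((k : Int) - 1) 0 == 1)) := by
    have h0 : ¬ ((k : Int) + 1 == 0) = true := by simp; omega
    rw [if_neg h0]
    cases k with
    | zero =>
      have : ((0 : Nat) : Int) + 1 - 1 = (0 : Int) := by norm_num
      rw [this, PySem.List.pyGetD_zero_cons, if_pos (by norm_num)]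
      simp [bne]
    | succ m =>
      have h1 : ((m + 1 : Nat) : Int) + 1 - 1 = ((m : Int) + 1) := by push_cast; ring
      have h2 : ¬ (((m + 1 : Nat) : Int) == 0) = true := by simp only [beq_iff_eq]; push_cast; omega
      have h3 : ((m + 1 : Nat) : Int) - 1 = (m : Int) := by push_cast; ring
      rw [h1, pyGetD_cons_shift x t (m : Int) (by positivity), if_neg h2, h3]
  have hmid : ((PySem.List.pyRange 0 K 1).all
        (fun u => PySem.List.pyGetD (x :: t) ((k : Int) + 1 + u) 0 == 1))
      = ((PySem.List.pyRange 0 K 1).all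
        (fun u => PySem.List.pyGetD t ((k : Int) + u) 0 == 1)) := by
    apply all_congr'
    intro u hu
    rw [PySem.List.mem_pyRange_one] at hu
    have h4 : (k : Int) + 1 + u = ((k : Int) + u) + 1 := by ring
    rw [h4, pyGetD_cons_shift x t _ (by omega)]
  have hright : (((k : Int) + 1 + K == ((x :: t).length : Int))
        || !(PySem.List.pyGetD (x :: t) ((k : Int) + 1 + K) 0 == 1))
      = (((k : Int) + K == (t.length : Int))
        || !(PySem.List.pyGetD t ((k : Int) + K) 0 == 1)) := by
    have h4 : (k : Int) + 1 + K = ((k : Int) + K) + 1 := by ring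
    have h5 : (((k : Int) + 1 + K == ((x :: t).length : Int)))
        = (((k : Int) + K == (t.length : Int))) := by
      have hl : ((x :: t).length : Int) = (t.length : Int) + 1 := by push_cast [List.length_cons]; ring
      rw [Bool.eq_iff_iff]
      simp only [beq_iff_eq, hl]
      omega
    rw [h5, h4, pyGetD_cons_shift x t _ (by omega)]
  unfold pvFitsB
  rw [hleft, hmid, hright]


-- pyGetD on the empty list is the default
theorem pyGetD_nil (i : Int) : PySem.List.pyGetD ([] : List Int) i 0 = 0 := by
  simp [PySem.List.pyGetD, PySem.List.pyGet?, PySem.List.pyIdx?]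

-- positional characterization of the leading run of 1s
theorem pvLead_spec (L : List Int) : ∀ K : Int, 0 ≤ K →
    (pvLead L = K ↔
      ((∀ u : Int, 0 ≤ u → u < K → PySem.List.pyGetD L u 0 = 1) ∧
        (K = (L.length : Int) ∨ ¬ PySem.List.pyGetD L K 0 = 1))) := by
  induction L with
  | nil =>
    intro K hK
    constructor
    · intro h
      have h0 : K = 0 := by simp [pvLead] at h; omega
      exact ⟨fun u h1 h2 => absurd h2 (by omega), Or.inl (by simp [h0])⟩
    · rintro ⟨h1, _⟩
      show pvLead [] = K
      by_contra hne
      have hK1 : 1 ≤ K := by simp [pvLead] at hne ⊢; omega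
      have := h1 0 le_rfl (by omega)
      rw [pyGetD_nil] at this
      exact absurd this (by norm_num)
  | cons x t ih =>
    intro K hK
    by_cases hx : x = 1
    · subst hx
      rcases lt_or_eq_of_le hK with hpos | hzero
      · have IH := ih (K - 1) (by omega)
        constructor
        · intro h
          have ht : pvLead t = K - 1 := by simp [pvLead] at h; omega
          obtain ⟨ha, hb⟩ := IH.mp ht
          refine ⟨?_, ?_⟩
          · intro u h1 h2
            rcases eq_or_lt_of_le h1 with h10 | h1p
            · rw [← h10, PySem.List.pyGetD_zero_cons]
            · have hu : u = (u - 1) + 1 := by ring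
              rw [hu, pyGetD_cons_shift 1 t (u - 1) (by omega)]
              exact ha (u - 1) (by omega) (by omega)
          · rcases hb with hb | hb
            · left; simp [List.length_cons]; omega
            · right
              have hKs : K = (K - 1) + 1 := by ring
              rw [hKs, pyGetD_cons_shift 1 t (K - 1) (by omega)]
              exact hb
        · rintro ⟨ha, hb⟩
          have ha' : ∀ u : Int, 0 ≤ u → u < K - 1 → PySem.List.pyGetD t u 0 = 1 := by
            intro u h1 h2
            have := ha (u + 1) (by omega) (by omega)
            rwa [pyGetD_cons_shift 1 t u h1] at this
          have hb' : K - 1 = (t.length : Int) ∨ ¬ PySem.List.pyGetD t (K - 1) 0 = 1 := by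
            rcases hb with hb | hb
            · left; simp [List.length_cons] at hb; omega
            · right
              have hKs : K = (K - 1) + 1 := by ring
              rw [hKs, pyGetD_cons_shift 1 t (K - 1) (by omega)] at hb
              exact hb
          have := IH.mpr ⟨ha', hb'⟩
          simp [pvLead]; omega
      · -- K = 0: impossible on both sides
        subst hzero
        constructor
        · intro h
          have := pvLead_nonneg t
          simp [pvLead] at h; omega
        · rintro ⟨_, hb⟩
          rcases hb with hb | hb
          · simp [List.length_cons] at hb; omega
          · rw [PySem.List.pyGetD_zero_cons] at hb
            exact absurd rfl hb
    · -- x ≠ 1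
      constructor
      · intro h
        have h0 : K = 0 := by simp [pvLead, hx] at h; omega
        subst h0
        exact ⟨fun u h1 h2 => absurd h2 (by omega),
          Or.inr (by rw [PySem.List.pyGetD_zero_cons]; exact hx)⟩
      · rintro ⟨ha, _⟩
        show pvLead (x :: t) = K
        by_contra hne
        have hK1 : 1 ≤ K := by simp [pvLead, hx] at hne ⊢; omega
        have := ha 0 le_rfl (by omega)
        rw [PySem.List.pyGetD_zero_cons] at this
        exact hx this

-- the window test at j = 0 holds iff the leading run of 1s has length exactly K
theorem pvFitsB0 (K : Int) (hK : 0 ≤ K) (b : Bool) (M : List Int) :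
    pvFitsB K b M 0 = (b && (pvLead M == K)) := by
  rw [Bool.eq_iff_iff]
  simp only [pvFitsB, Bool.and_eq_true, Bool.or_eq_true, List.all_eq_true,
    PySem.List.mem_pyRange_one, beq_iff_eq, Bool.not_eq_true', beq_eq_false_iff_ne,
    ne_eq, zero_add, and_imp]
  constructor
  · rintro ⟨⟨hb, h2⟩, h3⟩
    exact ⟨hb, (pvLead_spec M K hK).mpr ⟨h2, h3⟩⟩
  · rintro ⟨hb, hl⟩
    obtain ⟨h2, h3⟩ := (pvLead_spec M K hK).mp hl
    exact ⟨⟨hb, h2⟩, h3⟩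

-- a counting fold over range(a, b) as a fold over List.range
theorem foldl_count_pyRange (r : Int → Bool) (a b : Int) :
    (PySem.List.pyRange a b 1).foldl (fun s j => if r j then s + 1 else (s : Int)) 0
      = (List.range (b - a).toNat).foldl
          (fun (s : Int) (k : Nat) => if r (a + (k : Int)) then s + 1 else s) 0 := by
  rw [PySem.List.pyRange_one, List.foldl_map]

-- the index loop of B computes the recursive window count
theorem pvCountB_eq (K : Int) (hK : 0 ≤ K) : ∀ (L : List Int) (b : Bool),
    pvCountB K b L = pvCB K b L := by
  intro L
  induction L with
  | nil =>
    intro b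
    unfold pvCountB pvCB
    rcases lt_or_eq_of_le hK with hpos | hzero
    · rw [PySem.List.pyRange_one_eq_nil (by simp; omega)]
      have : ¬ (K == 0) = true := by simp; omega
      simp [this]
    · subst hzero
      have h1 : ((([] : List Int).length : Int) - 0 + 1) = 0 + 1 := by simp
      rw [h1, PySem.List.pyRange_one_singleton]
      simp only [List.foldl_cons, List.foldl_nil]
      rw [pvFitsB0 0 le_rfl b []]
      simp [pvLead]
  | cons x t ih =>
    intro b
    by_cases hbig : ((t.length : Int) + 1) < K
    · have h0 : pvCountB K b (x :: t) = 0 := by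
        unfold pvCountB
        rw [PySem.List.pyRange_one_eq_nil (by simp; omega)]
        rfl
      rw [h0, pvCB_short K hK (x :: t) b (by simp; omega)]
    · have hm : (0 : Int) < (((x :: t).length : Int) - K + 1) := by simp; omega
      unfold pvCountB
      rw [PySem.List.pyRange_one_cons hm, List.foldl_cons, pvCount_shift,
        foldl_count_pyRange (fun j => pvFitsB K b (x :: t) j) (0 + 1)]
      have harg : (((x :: t).length : Int) - K + 1 - (0 + 1)) = ((t.length : Int) - K + 1) - 0 := by
        simp [List.length_cons]; push_cast; ring
      rw [harg]
      have hpt : ∀ k ∈ List.range (((t.length : Int) - K + 1) - 0).toNat,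
          pvFitsB K b (x :: t) (0 + 1 + (k : Int)) = pvFitsB K (x != 1) t (0 + (k : Int)) := by
        intro k _
        have h1 : (0 : Int) + 1 + (k : Int) = (k : Int) + 1 := by ring
        have h2 : (0 : Int) + (k : Int) = (k : Int) := by ring
        rw [h1, h2]
        exact pvFitsB_shift K hK b x t k
      rw [foldl_count_congr _ _ _ hpt]
      have htail : (List.range (((t.length : Int) - K + 1) - 0).toNat).foldl
            (fun (s : Int) (k : Nat) => if pvFitsB K (x != 1) t ((0 : Int) + (k : Int)) then s + 1 else s) 0
          = pvCountB K (x != 1) t := by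
        unfold pvCountB
        rw [foldl_count_pyRange (fun j => pvFitsB K (x != 1) t j) 0]
      rw [htail, ih]
      show (if pvFitsB K b (x :: t) 0 then (0 : Int) + 1 else 0) + pvCB K (x != 1) t
          = pvCB K b (x :: t)
      rw [show pvCB K b (x :: t)
          = (if pvFitsB K b (x :: t) 0 then 1 else 0) + pvCB K (x != 1) t from rfl]
      split_ifs <;> omega

-- A's recursive scan equals the recursive window count
theorem pvSA_eq (K : Int) (hK : 0 ≤ K) : ∀ (L : List Int) (c : Int), 0 ≤ c →
    pvSA K c L = (if c = 0 then pvCB K true L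
      else (if (c + pvLead L == K) = true then 1 else 0) + pvCB K false L) := by
  intro L
  induction L with
  | nil =>
    intro c hc
    by_cases hc0 : c = 0
    · subst hc0
      rw [if_pos rfl]
      show (if ((0 : Int) == K) = true then (1 : Int) else 0)
          = (if (true && (K == 0)) = true then 1 else 0)
      have : ((0 : Int) == K) = (true && (K == 0)) := by
        rw [Bool.eq_iff_iff]; simp only [beq_iff_eq, Bool.true_and]; omega
      rw [this]
    · rw [if_neg hc0]
      show (if (c == K) = true then (1 : Int) else 0)
          = (if (c + pvLead [] == K) = true then 1 else 0)
            + (if (false && (K == 0)) = true then 1 else 0)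
      have h2 : (c + pvLead [] == K) = (c == K) := by simp [pvLead]
      rw [h2]
      simp
  | cons x t ih =>
    intro c hc
    by_cases hx : x = 1
    · subst hx
      have hL : pvSA K c (1 :: t) = pvSA K (c + 1) t := by simp [pvSA]
      rw [hL, ih (c + 1) (by omega), if_neg (by omega : ¬ c + 1 = 0)]
      have hcb : pvCB K false (1 :: t)
          = (if pvFitsB K false (1 :: t) 0 then 1 else 0) + pvCB K ((1 : Int) != 1) t := rfl
      by_cases hc0 : c = 0
      · subst hc0
        rw [if_pos rfl]
        rw [show pvCB K true (1 :: t)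
            = (if pvFitsB K true (1 :: t) 0 then 1 else 0) + pvCB K ((1 : Int) != 1) t from rfl,
          pvFitsB0 K hK true (1 :: t)]
        have hx1 : ((1 : Int) != 1) = false := by simp
        rw [hx1]
        have : (true && (pvLead (1 :: t) == K)) = (0 + 1 + pvLead t == K) := by
          rw [Bool.eq_iff_iff]; simp only [beq_iff_eq, Bool.true_and, pvLead_one]; omega
        rw [this]
      · rw [if_neg hc0, hcb, pvFitsB0 K hK false (1 :: t)]
        have hx1 : ((1 : Int) != 1) = false := by simp
        have hff : (false && (pvLead (1 :: t) == K)) = false := by simp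
        rw [hx1, hff]
        have : (c + 1 + pvLead t == K) = (c + pvLead (1 :: t) == K) := by
          rw [Bool.eq_iff_iff]; simp only [beq_iff_eq, pvLead_one]; omega
        rw [this]
        simp
    · have hL : pvSA K c (x :: t) = (if (c == K) = true then 1 else 0) + pvSA K 0 t := by
        simp [pvSA, hx]
      rw [hL, ih 0 le_rfl, if_pos rfl]
      have hbx : (x != 1) = true := by simp [hx]
      have hlead : pvLead (x :: t) = 0 := by simp [pvLead, hx]
      by_cases hc0 : c = 0
      · subst hc0
        rw [if_pos rfl]
        rw [show pvCB K true (x :: t)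
            = (if pvFitsB K true (x :: t) 0 then 1 else 0) + pvCB K (x != 1) t from rfl,
          pvFitsB0 K hK true (x :: t), hbx]
        have : ((0 : Int) == K) = (true && (pvLead (x :: t) == K)) := by
          rw [Bool.eq_iff_iff]; simp only [beq_iff_eq, Bool.true_and, hlead]
        rw [this]
      · rw [if_neg hc0]
        rw [show pvCB K false (x :: t)
            = (if pvFitsB K false (x :: t) 0 then 1 else 0) + pvCB K (x != 1) t from rfl,
          pvFitsB0 K hK false (x :: t), hbx]
        have hff : (false && (pvLead (x :: t) == K)) = false := by simp
        rw [hff]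
        have : (c + pvLead (x :: t) == K) = (c == K) := by simp [hlead]
        rw [this]
        simp

-- per-line: A's scan from a fresh counter equals B's window count
theorem pvFitsB_true (K : Int) (L : List Int) (j : Int) :
    pvFitsB K true L j = pvFits K L j := by
  unfold pvFitsB pvFits
  by_cases hj : (j == 0) = true
  · rw [if_pos hj, hj]; simp
  · rw [if_neg hj, Bool.eq_false_iff.mpr hj]; simp

theorem pvLine (K : Int) (hK : 0 ≤ K) (L : List Int) :
    pvSA K 0 L = pvCountLine K L := by
  rw [pvSA_eq K hK L 0 le_rfl, if_pos rfl, ← pvCountB_eq K hK L true]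
  unfold pvCountB pvCountLine
  exact foldl_count_congr _ _ _ (fun j _ => pvFitsB_true K L j) 0

-- outer-loop plumbing
theorem foldl_add_shift (f : Int → Int) (l : List Int) : ∀ a : Int,
    l.foldl (fun s x => s + f x) a = a + l.foldl (fun s x => s + f x) 0 := by
  induction l with
  | nil => intro a; simp
  | cons x t ih =>
    intro a
    simp only [List.foldl_cons]
    rw [ih (a + f x), ih (0 + f x)]
    omega

theorem foldl_add_congr (l : List Int) (f g : Int → Int) (h : ∀ x ∈ l, f x = g x) :
    ∀ a : Int, l.foldl (fun s x => s + f x) a = l.foldl (fun s x => s + g x) a := by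
  induction l with
  | nil => intro a; rfl
  | cons x t ih =>
    intro a
    simp only [List.foldl_cons, h x List.mem_cons_self]
    exact ih (fun y hy => h y (List.mem_cons_of_mem x hy)) _

-- A's inner loop over indices, as a scan of the materialized line
theorem pvA_fold' (K : Int) (f : Int → Int) (l : List Int) (wc : Int) :
    (if (l.foldl (fun p j => pvStep K p (f j)) ((0 : Int), wc)).1 == K
      then (l.foldl (fun p j => pvStep K p (f j)) ((0 : Int), wc)).2 + 1
      else (l.foldl (fun p j => pvStep K p (f j)) ((0 : Int), wc)).2)
      = wc + pvSA K 0 (l.map f) := by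
  have h := pvA_fold K (l.map f) 0 wc
  rw [List.foldl_map] at h
  exact h

-- reading the first N cells of a row via pyGetD materializes row[:N]
theorem map_pyGetD_range_take (row : List Int) (N : Int) (h0 : 0 ≤ N)
    (h : N.toNat ≤ row.length) :
    (PySem.List.pyRange 0 N 1).map (fun j => PySem.List.pyGetD row j 0)
      = row.take N.toNat := by
  rw [PySem.List.pyRange_one, List.map_map]
  apply List.ext_getElem
  · simp [List.length_take]; omega
  · intro i h1 h2
    simp only [List.getElem_map, List.getElem_range, Function.comp_apply, List.getElem_take]
    rw [zero_add, PySem.List.pyGetD_natCast]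
    exact List.getD_eq_getElem row 0 _

-- ===== VERDICT (by name: the statement is the Claim_ definition above) =====
theorem where_word_spec : Claim_equal_where_word := by
  unfold Claim_equal_where_word
  intro N K arr _ hPre
  obtain ⟨hKor, hlen, hrows⟩ := hPre
  unfold Spec_where_word
  simp only [where_word, where_word_alt]
  by_cases hN : N ≤ 0
  · rw [PySem.List.pyRange_one_eq_nil hN]
    simp
  · rw [not_le] at hN
    have hK : (0 : Int) ≤ K := hKor.resolve_right (by omega)
    have h0N : (0 : Int) ≤ N := le_of_lt hN
    simp only [pvA_fold', List.foldl_map]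
    rw [foldl_add_shift]
    have hH : (PySem.List.pyRange 0 N 1).foldl
          (fun wc i => wc + pvSA K 0 ((PySem.List.pyRange 0 N 1).map
            (fun j => PySem.List.pyGetD (PySem.List.pyGetD arr i []) j 0))) 0
        = (PySem.List.pyRange 0 N 1).foldl
          (fun s i => s + pvCountLine K
            (PySem.List.slice (PySem.List.pyGetD arr i []) none (some N))) 0 := by
      apply foldl_add_congr
      intro i hi
      rw [PySem.List.mem_pyRange_one] at hi
      have hiarr : i < (arr.length : Int) := lt_of_lt_of_le hi.2 hlen
      have hr : PySem.List.pyGetD arr i ([] : List Int) = arr[i.toNat]'(by omega) :=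
        PySem.List.pyGetD_eq_getElem arr [] hi.1 hiarr
      have hlt : i.toNat < (arr.take N.toNat).length := by
        simp [List.length_take]; omega
      have hmemtake : arr[i.toNat]'(by omega) ∈ arr.take N.toNat := by
        have hgt := List.getElem_take (xs := arr) (j := N.toNat) (i := i.toNat) (h := hlt)
        rw [← hgt]
        exact List.getElem_mem hlt
      have hrowlen : N ≤ ((arr[i.toNat]'(by omega)).length : Int) := hrows _ hmemtake
      rw [hr, PySem.List.slice_to _ h0N,
        map_pyGetD_range_take _ N h0N (by omega)]
      exact pvLine K hK _
    have hV : ∀ a : Int, (PySem.List.pyRange 0 N 1).foldl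
          (fun wc j => wc + pvSA K 0 ((PySem.List.pyRange 0 N 1).map
            (fun i => PySem.List.pyGetD (PySem.List.pyGetD arr i []) j 0))) a
        = (PySem.List.pyRange 0 N 1).foldl
          (fun s j => s + pvCountLine K ((PySem.List.pyRange 0 N 1).map
            (fun i => PySem.List.pyGetD (PySem.List.pyGetD arr i []) j 0))) a := by
      intro a
      apply foldl_add_congr
      intro j _
      exact pvLine K hK _
    rw [hH, hV]
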